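-- pv_equiv track=rewrite | github.com/seungh0/programmers-algorithm | 202107/20210707/1449.py | solution
-- ===== SOURCE A (Python) =====
-- from collections import deque
--
-- def solution(n, l, array):
--     array.sort()
--     queue = deque(array)
--     cnt = 0
--     while queue:
--         cnt += 1
--         front = queue.popleft()
--         while queue:
--             if queue[0] - front + 1 <= l:
--                 queue.popleft()
--             else:
--                 break
--     return cnt
-- ===== SOURCE B (Python) =====
-- def solution(n, l, array):
--     array.sort()
--     cnt = 0
--     cover_end = None
--     for x in array:
--         if cover_end is None or x > cover_end:
--             cnt += 1
--             cover_end = x + l - 1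
--     return cnt
-- ===== Notes on version B (the rewrite author's own statement) =====
-- stated objective: simpler
-- what changed: Replaced the deque with popleft and the nested inner while loop by a single flat pass over the sorted array maintaining a scalar coverage boundary (cover_end), incrementing the count whenever a point falls past it.
import Mathlib
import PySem

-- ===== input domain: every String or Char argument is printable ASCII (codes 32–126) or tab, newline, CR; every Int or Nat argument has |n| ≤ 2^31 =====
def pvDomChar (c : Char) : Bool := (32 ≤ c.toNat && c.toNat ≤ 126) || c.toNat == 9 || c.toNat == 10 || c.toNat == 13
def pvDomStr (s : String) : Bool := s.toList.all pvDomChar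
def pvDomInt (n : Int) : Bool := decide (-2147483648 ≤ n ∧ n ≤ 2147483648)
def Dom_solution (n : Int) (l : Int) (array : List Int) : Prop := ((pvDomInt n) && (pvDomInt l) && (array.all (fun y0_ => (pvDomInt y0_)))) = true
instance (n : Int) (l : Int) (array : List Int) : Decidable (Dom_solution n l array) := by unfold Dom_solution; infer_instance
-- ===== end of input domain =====

-- B replaces A's deque and nested while loop by one flat pass over the sorted array keeping a
-- scalar coverage boundary (objective: simpler). A sorts `array` in place; the equivalence
-- proved here is about the return value only.

-- ===== PORT A =====
-- inner `while queue: if queue[0] - front + 1 <= l: popleft else break`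
def solSkip (l : Int) (front : Int) : List Int → List Int
  | [] => []
  | x :: rest => if x - front + 1 ≤ l then solSkip l front rest else x :: rest

theorem solSkip_len_le (l front : Int) : ∀ (xs : List Int), (solSkip l front xs).length ≤ xs.length := by
  intro xs
  induction xs with
  | nil => simp [solSkip]
  | cons x rest ih =>
    simp only [solSkip]
    split
    · exact Nat.le_succ_of_le ih
    · exact Nat.le_refl _

-- outer `while queue: cnt += 1; front = popleft; <inner loop>`
def solLoop (l : Int) : List Int → Int
  | [] => 0
  | front :: rest => 1 + solLoop l (solSkip l front rest)
termination_by xs => xs.length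
decreasing_by exact Nat.lt_succ_of_le (solSkip_len_le l front rest)

def solution (n : Int) (l : Int) (array : List Int) : Int :=
  solLoop l (PySem.List.sorted array (fun x => x) false)

-- ===== PORT B =====
def solStep (l : Int) (s : Int × Option Int) (x : Int) : Int × Option Int :=
  match s.2 with
  | none => (s.1 + 1, some (x + l - 1))
  | some ce => if x > ce then (s.1 + 1, some (x + l - 1)) else s

def solution_alt (n : Int) (l : Int) (array : List Int) : Int :=
  ((PySem.List.sorted array (fun x => x) false).foldl (solStep l) (0, none)).1

-- ===== PRECONDITION & SPEC =====
def Spec_solution (n : Int) (l : Int) (array : List Int) (out : Int) : Prop := out = solution_alt n l array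
instance (n : Int) (l : Int) (array : List Int) (out : Int) : Decidable (Spec_solution n l array out) := by unfold Spec_solution; infer_instance

-- ===== CLAIM (what is proved, stated in full; the proofs are below) =====
def Claim_equal_solution : Prop := ∀ (n : Int) (l : Int) (array : List Int), Dom_solution n l array → Spec_solution n l array (solution n l array)

-- ===== LEMMAS AND PROOFS =====

-- folding B's step with boundary front+l-1 counts exactly what A counts after the inner skip
theorem fold_skip (l : Int) : ∀ (xs : List Int) (c front : Int),
    (xs.foldl (solStep l) (c, some (front + l - 1))).1 = c + solLoop l (solSkip l front xs) := by
  intro xs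
  induction xs with
  | nil => intro c front; simp [solSkip, solLoop]
  | cons x rest ih =>
    intro c front
    by_cases h : x - front + 1 ≤ l
    · have hx : ¬ x > front + l - 1 := by omega
      simp only [List.foldl_cons, solStep, hx, solSkip, if_pos h]
      exact ih c front
    · have hx : x > front + l - 1 := by omega
      simp only [List.foldl_cons, solStep, if_pos hx, solSkip, if_neg h, solLoop]
      rw [ih (c + 1) x]
      ring

theorem fold_eq_loop (l : Int) (xs : List Int) :
    (xs.foldl (solStep l) ((0 : Int), (none : Option Int))).1 = solLoop l xs := by
  cases xs with
  | nil => simp [solLoop]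
  | cons x rest =>
    simp only [List.foldl_cons, solStep, solLoop]
    rw [show ((0:Int)+1) = 1 from rfl, fold_skip l rest 1 x]

-- ===== VERDICT (by name: the statement is the Claim_ definition above) =====
theorem solution_spec : Claim_equal_solution := by
  intro n l array _
  unfold Spec_solution solution solution_alt
  exact (fold_eq_loop l _).symm
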